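-- pv_equiv track=rewrite | github.com/xushangning/ee208-for-myself | server.py | parse_query
-- ===== SOURCE A (Python) =====
-- def parse_query(query):
--     """
--     Parse queries in the form "<term>* (<field>:<term>)*" to a dict
--     :param query: str. Terms whose field is not specified will be gathered in
--     the "default" field
--     :return: dict
--     """
--     allowed_fields = {'title', 'content', 'site'}
--     query_dict = {}
--     for i in query.split(' '):
--         if ':' in i:
--             opt, value = i.split(':')[:2]
--             opt = opt.lower()
--             # Currently, if there are multiple occurrences of the same field,
--             # only the last term will be added to the query.
--             if opt in allowed_fields and len(value):
--                 query_dict[opt] = value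
--         else:
--             # gather terms without fields under the "default" key
--             query_dict['default'] = query_dict.get('default', '') + ' ' + i
--     return query_dict
-- ===== SOURCE B (Python) =====
-- def _pair(t):
--     """Normalise one token to a (key, value) pair, or None if it is dropped."""
--     if ':' not in t:
--         return ('default', ' ' + t)
--     parts = t.split(':')
--     opt = parts[0].lower()
--     if opt in ('title', 'content', 'site') and parts[1]:
--         return (opt, parts[1])
--     return None
--
--
-- def parse_query(query):
--     pairs = [p for t in query.split(' ') if (p := _pair(t)) is not None]
--     keys = list(dict.fromkeys(k for k, _ in pairs))
--
--     def val(k):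
--         vs = [v for kk, v in pairs if kk == k]
--         return ''.join(vs) if k == 'default' else vs[-1]
--
--     return {k: val(k) for k in keys}
-- ===== Notes on version B (the rewrite author's own statement) =====
-- stated objective: alternative
-- what changed: Replaces A's single pass that mutates a dict per token by a normalise-then-group-by pipeline: each token is mapped to an optional (key,value) pair, keys are deduplicated in first-occurrence order, and each key's value is computed once from its grouped values (join for 'default', last for fields).
import Mathlib
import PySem

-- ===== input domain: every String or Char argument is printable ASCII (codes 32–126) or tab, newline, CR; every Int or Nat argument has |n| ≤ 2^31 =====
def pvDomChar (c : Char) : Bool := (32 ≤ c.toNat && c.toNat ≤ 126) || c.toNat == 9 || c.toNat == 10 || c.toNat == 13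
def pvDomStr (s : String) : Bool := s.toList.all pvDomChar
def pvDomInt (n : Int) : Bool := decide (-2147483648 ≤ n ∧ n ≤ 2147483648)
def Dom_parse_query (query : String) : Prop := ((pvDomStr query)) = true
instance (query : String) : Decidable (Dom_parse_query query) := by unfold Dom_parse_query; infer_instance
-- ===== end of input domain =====

-- B replaces A's per-token dict mutation by a normalise-then-group-by pipeline (alternative decomposition, same cost).

-- ===== PORT A =====
-- s.split(sep) is PySem.Str.split?; the literal separators " " / ":" are nonempty, so '.getD []' never fires.
-- 'opt, value = i.split(':')[:2]' cannot raise when ':' in i (split then has ≥ 2 parts); ported with getD.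
-- 'opt in allowed_fields' on the literal 3-element set is ported as the explicit disjunction; 'len(value)' truthiness as value != "".
def parse_query (query : String) : List (String × String) :=
  (((PySem.Str.split? query " ").getD []).foldl
    (fun (d : PySem.Dict String String) i =>
      if PySem.Str.isIn ":" i then
        let parts := (PySem.Str.split? i ":").getD []
        let opt := PySem.Str.lower (parts.getD 0 "")
        let value := parts.getD 1 ""
        if (opt == "title" || opt == "content" || opt == "site") && value != "" then
          d.insert opt value
        else d
      else
        d.insert "default" (d.getD "default" "" ++ " " ++ i))
    PySem.Dict.empty).items

-- ===== PORT B =====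
-- Source B's _pair: one token to an optional (key, value) pair
def pqPair (t : String) : Option (String × String) :=
  if PySem.Str.isIn ":" t then
    let parts := (PySem.Str.split? t ":").getD []
    let opt := PySem.Str.lower (parts.getD 0 "")
    if (opt == "title" || opt == "content" || opt == "site") && parts.getD 1 "" != "" then
      some (opt, parts.getD 1 "")
    else none
  else some ("default", " " ++ t)

-- list(dict.fromkeys(..)) is PySem.List.dedup; ''.join is String.join; vs[-1] is getLast! (vs nonempty for every produced key)
def parse_query_alt (query : String) : List (String × String) :=
  let pairs := ((PySem.Str.split? query " ").getD []).filterMap pqPair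
  let keys := PySem.List.dedup (pairs.map Prod.fst)
  keys.map (fun k =>
    let vs := (pairs.filter (fun p => p.1 == k)).map Prod.snd
    (k, if k == "default" then String.join vs else vs.getLast!))

-- ===== PRECONDITION & SPEC =====
def Spec_parse_query (query : String) (out : List (String × String)) : Prop := out = parse_query_alt query
instance (query : String) (out : List (String × String)) : Decidable (Spec_parse_query query out) := by unfold Spec_parse_query; infer_instance

-- ===== CLAIM (what is proved, stated in full; the proofs are below) =====
def Claim_equal_parse_query : Prop := ∀ (query : String), Dom_parse_query query → Spec_parse_query query (parse_query query)

-- ===== LEMMAS AND PROOFS =====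

-- uniform update: what one normalised pair does to A's dict
def pqUpd (d : PySem.Dict String String) (p : String × String) : PySem.Dict String String :=
  d.insert p.1 (if p.1 == "default" then d.getD p.1 "" ++ p.2 else p.2)

-- B's group-by result on a list of normalised pairs
def pqBuild (ps : List (String × String)) : List (String × String) :=
  (PySem.List.dedup (ps.map Prod.fst)).map (fun k =>
    (k, if k == "default"
        then String.join ((ps.filter (fun p => p.1 == k)).map Prod.snd)
        else ((ps.filter (fun p => p.1 == k)).map Prod.snd).getLast!))

lemma pqAlt_eq (query : String) :
    parse_query_alt query = pqBuild (((PySem.Str.split? query " ").getD []).filterMap pqPair) := rfl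

lemma step_eq (d : PySem.Dict String String) (i : String) :
    (if PySem.Str.isIn ":" i then
        let parts := (PySem.Str.split? i ":").getD []
        let opt := PySem.Str.lower (parts.getD 0 "")
        let value := parts.getD 1 ""
        if (opt == "title" || opt == "content" || opt == "site") && value != "" then
          d.insert opt value
        else d
      else
        d.insert "default" (d.getD "default" "" ++ " " ++ i))
    = (pqPair i).elim d (pqUpd d) := by
  unfold pqPair pqUpd
  by_cases h : PySem.Str.isIn ":" i = true
  · simp only [h, if_true]
    set parts := (PySem.Str.split? i ":").getD [] with hparts
    set opt := PySem.Str.lower (parts.getD 0 "") with hopt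
    by_cases hc : ((opt == "title" || opt == "content" || opt == "site")
            && parts.getD 1 "" != "") = true
    · simp only [hc, if_true, Option.elim]
      have hne : (opt == "default") = false := by
        rcases (Bool.and_eq_true _ _).mp hc with ⟨h1, _⟩
        rcases (Bool.or_eq_true _ _).mp h1 with h2 | h2
        · rcases (Bool.or_eq_true _ _).mp h2 with h3 | h3 <;> simp_all [beq_iff_eq]
        · simp_all [beq_iff_eq]
      simp only [hne, Bool.false_eq_true, if_false]
    · rw [Bool.not_eq_true] at hc
      simp only [hc, Bool.false_eq_true, if_false, Option.elim]
  · rw [Bool.not_eq_true] at h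
    simp only [h, Bool.false_eq_true, if_false, Option.elim, beq_self_eq_true, if_true,
      String.append_assoc]

lemma foldl_tokens (ts : List String) (d : PySem.Dict String String) :
    ts.foldl
      (fun (d : PySem.Dict String String) i =>
        if PySem.Str.isIn ":" i then
          let parts := (PySem.Str.split? i ":").getD []
          let opt := PySem.Str.lower (parts.getD 0 "")
          let value := parts.getD 1 ""
          if (opt == "title" || opt == "content" || opt == "site") && value != "" then
            d.insert opt value
          else d
        else
          d.insert "default" (d.getD "default" "" ++ " " ++ i)) d
    = (ts.filterMap pqPair).foldl pqUpd d := by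
  induction ts generalizing d with
  | nil => rfl
  | cons t ts ih =>
    simp only [List.foldl_cons, List.filterMap_cons]
    rw [step_eq d t]
    cases h : pqPair t with
    | none => simp only [Option.elim]; exact ih d
    | some p => simp only [Option.elim, List.foldl_cons]; exact ih _

lemma dedup_append_singleton {α : Type} [BEq α] [LawfulBEq α] (xs : List α) (x : α) :
    PySem.List.dedup (xs ++ [x])
      = if x ∈ xs then PySem.List.dedup xs else PySem.List.dedup xs ++ [x] := by
  simp only [PySem.List.dedup_eq_ofList, PySem.Set.ofList_eq_foldl, List.foldl_append,
    List.foldl_cons, List.foldl_nil]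
  rw [← PySem.Set.ofList_eq_foldl]
  unfold PySem.Set.add
  by_cases hx : x ∈ xs
  · simp [hx]
  · have hc : PySem.Set.contains (PySem.Set.ofList xs) x = false := by
      rw [Bool.eq_false_iff]
      intro hc
      exact hx ((PySem.Set.mem_ofList _ _).mp ((PySem.Set.contains_iff _ _).mp hc))
    simp [hx]

lemma keys_build (ps : List (String × String)) :
    (pqBuild ps).map Prod.fst = PySem.List.dedup (ps.map Prod.fst) := by
  unfold pqBuild
  rw [List.map_map]
  exact (List.map_congr_left (fun a _ => rfl)).trans (List.map_id _)

lemma join_concat (vs : List String) (v : String) :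
    String.join (vs ++ [v]) = String.join vs ++ v := by
  simp [String.join, List.foldl_append]

lemma foldl_upd_eq_build (ps : List (String × String)) :
    ps.foldl pqUpd PySem.Dict.empty = PySem.Dict.mk (pqBuild ps) := by
  induction ps using List.reverseRecOn with
  | nil => rfl
  | append_singleton ps p ih =>
    obtain ⟨k, v⟩ := p
    rw [List.foldl_append, List.foldl_cons, List.foldl_nil, ih]
    have hkeys : (PySem.Dict.mk (pqBuild ps)).keys = PySem.List.dedup (ps.map Prod.fst) := by
      rw [PySem.Dict.keys_mk, keys_build]
    have hkeysnd : (PySem.Dict.mk (pqBuild ps)).keys.Nodup := by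
      rw [hkeys]; exact PySem.List.nodup_dedup _
    by_cases hk : k ∈ ps.map Prod.fst
    · -- key already present: insert overwrites in place
      have hmem : k ∈ (PySem.Dict.mk (pqBuild ps)).keys := by
        rw [hkeys, PySem.List.mem_dedup]; exact hk
      have hcont : (PySem.Dict.mk (pqBuild ps)).contains k = true :=
        (PySem.Dict.contains_iff_mem_keys _ _).mpr hmem
      have hgetD : (PySem.Dict.mk (pqBuild ps)).getD k ""
          = (if k == "default"
             then String.join ((ps.filter (fun p => p.1 == k)).map Prod.snd)
             else ((ps.filter (fun p => p.1 == k)).map Prod.snd).getLast!) := by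
        have hin : (k, (if k == "default"
             then String.join ((ps.filter (fun p => p.1 == k)).map Prod.snd)
             else ((ps.filter (fun p => p.1 == k)).map Prod.snd).getLast!))
              ∈ (PySem.Dict.mk (pqBuild ps)).items := by
          show _ ∈ pqBuild ps
          unfold pqBuild
          exact List.mem_map.mpr ⟨k, by rw [PySem.List.mem_dedup]; exact hk, rfl⟩
        rw [PySem.Dict.getD_eq_get?_getD,
          PySem.Dict.get?_of_mem_items _ hin hkeysnd]
        rfl
      apply PySem.Dict.ext
      simp only [pqUpd]
      rw [PySem.Dict.items_insert_of_contains _ _ hcont]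
      show List.map _ (pqBuild ps) = pqBuild (ps ++ [(k, v)])
      simp only [pqBuild] at hgetD ⊢
      rw [List.map_map]
      simp only [List.map_append, List.map_cons, List.map_nil]
      rw [dedup_append_singleton, if_pos hk]
      apply List.map_congr_left
      intro k' hk'
      simp only [Function.comp]
      by_cases hkk : k' = k
      · subst hkk
        simp only [beq_self_eq_true, if_true]
        rw [List.filter_append]
        simp only [List.filter_cons, List.filter_nil, beq_self_eq_true, if_true]
        simp only [List.map_append, List.map_cons, List.map_nil]
        rw [hgetD]
        by_cases hd : k' = "default"
        · subst hd
          simp [join_concat]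
        · have hb : (k' == "default") = false := by simp [hd]
          simp [hb]
      · have h1 : (k' == k) = false := by simp [hkk]
        simp only [h1, Bool.false_eq_true, if_false]
        rw [List.filter_append]
        have hnil : List.filter (fun p => p.1 == k') [(k, v)] = [] := by
          simp [Ne.symm hkk]
        rw [hnil, List.append_nil]
    · -- fresh key: insert appends, the old value is the default ""
      have hncont : (PySem.Dict.mk (pqBuild ps)).contains k = false := by
        rw [Bool.eq_false_iff]
        intro hc
        have hm := (PySem.Dict.contains_iff_mem_keys _ _).mp hc
        rw [hkeys, PySem.List.mem_dedup] at hm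
        exact hk hm
      have hgetD : (PySem.Dict.mk (pqBuild ps)).getD k "" = "" :=
        PySem.Dict.getD_of_not_contains _ _ hncont
      apply PySem.Dict.ext
      simp only [pqUpd]
      rw [PySem.Dict.items_insert_of_not_contains _ _ hncont]
      show pqBuild ps ++ _ = pqBuild (ps ++ [(k, v)])
      simp only [pqBuild] at hgetD ⊢
      simp only [List.map_append, List.map_cons, List.map_nil]
      rw [dedup_append_singleton, if_neg hk, List.map_append]
      congr 1
      · apply List.map_congr_left
        intro k' hk'
        have hkk : k' ≠ k := by
          intro h; subst h
          rw [PySem.List.mem_dedup] at hk'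
          exact hk hk'
        rw [List.filter_append]
        have hnil : List.filter (fun p => p.1 == k') [(k, v)] = [] := by
          simp [Ne.symm hkk]
        rw [hnil, List.append_nil]
      · have hfil : List.filter (fun p => p.1 == k) (ps ++ [(k, v)]) = [(k, v)] := by
          rw [List.filter_append]
          have h1 : List.filter (fun p => p.1 == k) ps = [] := by
            rw [List.filter_eq_nil_iff]
            intro p hp hbeq
            exact hk (List.mem_map.mpr ⟨p, hp, by simpa using hbeq⟩)
          simp [h1]
        simp only [List.map_cons, List.map_nil, hfil, hgetD]
        by_cases hd : k = "default"
        · subst hd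
          simp [String.join]
        · have hb : (k == "default") = false := by simp [hd]
          simp [hb, List.getLast!_eq_getLast?_getD]

-- ===== VERDICT (by name: the statement is the Claim_ definition above) =====
theorem parse_query_spec : Claim_equal_parse_query := by
  intro query _
  show parse_query query = parse_query_alt query
  rw [parse_query, foldl_tokens, foldl_upd_eq_build, pqAlt_eq]
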